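-- pv_equiv track=rewrite | github.com/mprpic/mdlint | src/mdlint/rules/md038.py | _find_backtick_string
-- ===== SOURCE A (Python) =====
-- def _find_backtick_string(source: str, markup: str, start: int) -> int | None:
--     """Find the next occurrence of a backtick string that is not part of a longer run.
--
--     Per CommonMark spec, a backtick string is a string of one or more backtick
--     characters that is neither preceded nor followed by a backtick character.
--     """
--     mlen = len(markup)
--     pos = start
--     while pos <= len(source) - mlen:
--         idx = source.find(markup, pos)
--         if idx < 0:
--             return None
--         # Must not be preceded by a backtick
--         if idx > 0 and source[idx - 1] == "`":
--             pos = idx + 1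
--             continue
--         # Must not be followed by a backtick
--         end = idx + mlen
--         if end < len(source) and source[end] == "`":
--             pos = idx + 1
--             continue
--         return idx
--     return None
-- ===== SOURCE B (Python) =====
-- def _find_backtick_string(source: str, markup: str, start: int) -> int | None:
--     """Scan candidate positions directly: return the first index i >= start where
--     markup occurs and is neither preceded nor followed by a backtick."""
--     n = len(source)
--     m = len(markup)
--     for i in range(start, n - m + 1):
--         if (source[i:i + m] == markup
--                 and (i == 0 or source[i - 1] != "`")
--                 and (i + m == n or source[i + m] != "`")):
--             return i
--     return None
-- ===== Notes on version B (the rewrite author's own statement) =====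
-- stated objective: idiomatic
-- what changed: A repeatedly calls source.find(markup, pos) and manually advances past occurrences adjacent to a backtick; B is a single direct scan that tests every candidate index i >= start for a slice match with non-backtick neighbours and returns the first hit.
-- outside the precondition, e.g. on _find_backtick_string('`a`', '`', -1): A returns 2, B returns 0
import Mathlib
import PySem

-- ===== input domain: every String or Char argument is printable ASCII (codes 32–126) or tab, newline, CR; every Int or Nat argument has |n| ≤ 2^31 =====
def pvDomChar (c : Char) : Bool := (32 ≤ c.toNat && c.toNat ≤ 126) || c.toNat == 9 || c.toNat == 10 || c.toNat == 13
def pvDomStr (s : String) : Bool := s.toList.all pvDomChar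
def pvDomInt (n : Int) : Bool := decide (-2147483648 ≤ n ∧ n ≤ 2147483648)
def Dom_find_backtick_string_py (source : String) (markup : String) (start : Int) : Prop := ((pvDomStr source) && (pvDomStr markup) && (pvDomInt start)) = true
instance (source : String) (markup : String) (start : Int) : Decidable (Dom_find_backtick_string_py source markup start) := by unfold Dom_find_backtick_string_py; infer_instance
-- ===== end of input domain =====

-- B replaces A's find-and-skip while-loop by a direct for-loop over candidate indices; no speed claim.
-- Pre_ restricts start to nonnegative scan positions (A's behaviour on negative start follows
-- str.find's negative-index wraparound, outside this helper's natural domain).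


-- ===== PORT A =====
-- A's while-loop: repeated idx = source.find(markup, pos); skip hits adjacent to a backtick
def findA_loop (source markup : String) (pos : Int) : Option Int :=
  if hpos : pos ≤ PySem.Str.len source - PySem.Str.len markup then
    -- idx = source.find(markup, pos)  (inlined below)
    if hneg : PySem.Str.findFrom source markup pos < 0 then none
    else if hg1 : 0 < PySem.Str.findFrom source markup pos ∧
        PySem.Str.pyGet? source (PySem.Str.findFrom source markup pos - 1) = some '`' then
      findA_loop source markup (PySem.Str.findFrom source markup pos + 1)
    else if hg2 : PySem.Str.findFrom source markup pos + PySem.Str.len markup < PySem.Str.len source ∧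
        PySem.Str.pyGet? source (PySem.Str.findFrom source markup pos + PySem.Str.len markup) = some '`' then
      findA_loop source markup (PySem.Str.findFrom source markup pos + 1)
    else some (PySem.Str.findFrom source markup pos)
  else none
termination_by (PySem.Str.len source - PySem.Str.len markup + 1 - pos).toNat
decreasing_by
  all_goals
  · have hm0 : (0:Int) ≤ PySem.Str.len markup := by
      simp [PySem.Str.len_eq]
    have hle : pos ≤ PySem.Str.findFrom source markup pos := by
      by_cases hp : 0 ≤ pos
      · have hk : pos.toNat ≤ source.toList.length := by
          simp only [PySem.Str.len_eq] at hpos hm0; omega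
        have hcast : ((pos.toNat : Nat) : Int) = pos := Int.toNat_of_nonneg hp
        have hne : PySem.Chars.findFrom source.toList markup.toList ((pos.toNat : Nat) : Int) ≠ -1 := by
          rw [hcast, ← PySem.Str.findFrom_eq]; omega
        have := (PySem.Chars.findFrom_natCast_spec source.toList markup.toList pos.toNat hk hne).1
        rw [hcast, ← PySem.Str.findFrom_eq] at this
        omega
      · omega
    omega

def find_backtick_string_py (source : String) (markup : String) (start : Int) : Option Int :=
  findA_loop source markup start

-- ===== PORT B =====
-- B's for-loop: try each index i in range(start, n - m + 1), test slice and neighbours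
def scanB (source markup : String) (i : Int) : Option Int :=
  if hi : i < PySem.Str.len source - PySem.Str.len markup + 1 then
    if PySem.Str.slice source (some i) (some (i + PySem.Str.len markup)) = markup
        ∧ (i = 0 ∨ ¬ PySem.Str.pyGet? source (i - 1) = some '`')
        ∧ (i + PySem.Str.len markup = PySem.Str.len source ∨
            ¬ PySem.Str.pyGet? source (i + PySem.Str.len markup) = some '`') then
      some i
    else scanB source markup (i + 1)
  else none
termination_by (PySem.Str.len source - PySem.Str.len markup + 1 - i).toNat
decreasing_by omega

def find_backtick_string_py_alt (source : String) (markup : String) (start : Int) : Option Int :=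
  scanB source markup start

-- ===== PRECONDITION & SPEC =====
-- Pre_ excludes negative start positions: there A inherits str.find's negative-index wraparound
-- (it scans from len(source)+start), outside the natural domain of a forward-scan start index.
def Pre_find_backtick_string_py (source : String) (markup : String) (start : Int) : Prop := 0 ≤ start
instance (source : String) (markup : String) (start : Int) : Decidable (Pre_find_backtick_string_py source markup start) := by unfold Pre_find_backtick_string_py; infer_instance

def pvWitness_find_backtick_string_py : String × String × Int := ("a `x` b", "`", 0)

def Spec_find_backtick_string_py (source : String) (markup : String) (start : Int) (out : Option Int) : Prop := out = find_backtick_string_py_alt source markup start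
instance (source : String) (markup : String) (start : Int) (out : Option Int) : Decidable (Spec_find_backtick_string_py source markup start out) := by unfold Spec_find_backtick_string_py; infer_instance

-- ===== CLAIM (what is proved, stated in full; the proofs are below) =====
def Claim_equal_find_backtick_string_py : Prop := ∀ (source : String) (markup : String) (start : Int), Dom_find_backtick_string_py source markup start → Pre_find_backtick_string_py source markup start → Spec_find_backtick_string_py source markup start (find_backtick_string_py source markup start)

-- ===== LEMMAS AND PROOFS =====

-- the occurrence predicate both loops are about: markup occurs in source at index j
def MatchAt (source markup : String) (j : Nat) : Prop := markup.toList <+: source.toList.drop j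

-- B's slice test at a nonnegative index is exactly MatchAt
lemma sliceTest_iff (source markup : String) (i : Int) (hi : 0 ≤ i) :
    PySem.Str.slice source (some i) (some (i + PySem.Str.len markup)) = markup ↔
      MatchAt source markup i.toNat := by
  have hcast : ((i.toNat : Nat) : Int) = i := Int.toNat_of_nonneg hi
  have h2 : i + PySem.Str.len markup = ((i.toNat + markup.toList.length : Nat) : Int) := by
    simp [PySem.Str.len_eq]; omega
  rw [← String.toList_inj, PySem.Str.toList_slice, PySem.Chars.slice_eq_listSlice, h2, ← hcast,
    PySem.List.slice_natCast]
  simp only [Int.toNat_natCast]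
  have h3 : i.toNat + markup.toList.length - i.toNat = markup.toList.length := by omega
  rw [h3]
  unfold MatchAt
  rw [List.prefix_iff_eq_take]
  exact eq_comm

-- B's scan is unchanged across a stretch of indices with no occurrence
lemma scanB_congr (source markup : String) :
    ∀ (d : Nat) (i k : Int), 0 ≤ i → i ≤ k → (k - i).toNat = d →
      (∀ j : Nat, i ≤ (j : Int) → (j : Int) < k → ¬ MatchAt source markup j) →
      scanB source markup i = scanB source markup k := by
  intro d
  induction d with
  | zero =>
    intro i k hi hik hd _
    have : i = k := by omega
    rw [this]
  | succ d ih =>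
    intro i k hi hik hd h
    have hstep : scanB source markup i = scanB source markup (i + 1) := by
      rw [scanB]
      split_ifs with hg hc
      · exact absurd ((sliceTest_iff source markup i hi).mp hc.1)
          (h i.toNat (by omega) (by omega))
      · rfl
      · rw [scanB, dif_neg (by omega)]
    rw [hstep]
    exact ih (i + 1) k (by omega) (by omega) (by omega) (fun j h1 h2 => h j (by omega) h2)

-- B's scan returns none when there is no occurrence at or after i
lemma scanB_none (source markup : String) (i : Int) (hi : 0 ≤ i)
    (h : ∀ j : Nat, i ≤ (j : Int) → ¬ MatchAt source markup j) :
    scanB source markup i = none := by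
  by_cases hg : i < PySem.Str.len source - PySem.Str.len markup + 1
  · rw [scanB_congr source markup (PySem.Str.len source - PySem.Str.len markup + 1 - i).toNat i
      (PySem.Str.len source - PySem.Str.len markup + 1) hi (by omega) rfl
      (fun j h1 _ => h j h1)]
    rw [scanB, dif_neg (by omega)]
  · rw [scanB, dif_neg hg]

-- the two loops agree from every nonnegative position (fuel-indexed strong induction)
lemma mainEq (source markup : String) :
    ∀ (N : Nat) (pos : Int),
      (PySem.Str.len source - PySem.Str.len markup + 1 - pos).toNat ≤ N → 0 ≤ pos →
      findA_loop source markup pos = scanB source markup pos := by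
  intro N
  induction N with
  | zero =>
    intro pos hN hp
    rw [findA_loop, scanB, dif_neg (by omega), dif_neg (by omega)]
  | succ N ih =>
    intro pos hN hp
    by_cases hpos : pos ≤ PySem.Str.len source - PySem.Str.len markup
    · have hM0 : (0:Int) ≤ PySem.Str.len markup := by simp [PySem.Str.len_eq]
      have hL : PySem.Str.len source = (source.toList.length : Int) := PySem.Str.len_eq source
      have hM : PySem.Str.len markup = (markup.toList.length : Int) := PySem.Str.len_eq markup
      have hk : pos.toNat ≤ source.toList.length := by omega
      have hcast : ((pos.toNat : Nat) : Int) = pos := Int.toNat_of_nonneg hp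
      have hff : PySem.Chars.findFrom source.toList markup.toList ((pos.toNat : Nat) : Int) =
          PySem.Str.findFrom source markup pos := by
        rw [PySem.Str.findFrom_eq, hcast]
      by_cases hneg : PySem.Str.findFrom source markup pos < 0
      · -- find failed: no occurrence at or after pos; both loops return none
        have hidxm1 : PySem.Str.findFrom source markup pos = -1 := by
          have hEq := PySem.Chars.findFrom_natCast source.toList markup.toList pos.toNat hk
          rw [hff] at hEq
          have hfge := PySem.Chars.neg_one_le_find (source.toList.drop pos.toNat) markup.toList
          by_cases hf : PySem.Chars.find (source.toList.drop pos.toNat) markup.toList = -1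
          · rw [if_pos hf] at hEq; exact hEq
          · rw [if_neg hf] at hEq; omega
        have hninf : ¬ markup.toList <:+: source.toList.drop pos.toNat :=
          (PySem.Chars.findFrom_natCast_eq_neg_one_iff source.toList markup.toList pos.toNat hk).mp
            (by rw [hff]; exact hidxm1)
        rw [findA_loop, dif_pos hpos, dif_pos hneg]
        refine (scanB_none source markup pos hp (fun j hj hmj => hninf ?_)).symm
        have h1 : markup.toList <+: List.drop (j - pos.toNat) (source.toList.drop pos.toNat) := by
          rw [List.drop_drop]
          have he : pos.toNat + (j - pos.toNat) = j := by omega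
          rw [he]
          exact hmj
        exact (PySem.Chars.isIn_iff_infix _ _).mp
          ((PySem.Chars.exists_prefix_drop_iff_isIn _ _).mp ⟨_, h1⟩)
      · -- find hit at idx ≥ pos: first occurrence, B scans past [pos, idx) with no match
        have hne : PySem.Chars.findFrom source.toList markup.toList ((pos.toNat : Nat) : Int) ≠ -1 := by
          rw [hff]; omega
        obtain ⟨hge, hpre, hmin⟩ :=
          PySem.Chars.findFrom_natCast_spec source.toList markup.toList pos.toNat hk hne
        rw [hff] at hge hpre hmin
        set idx := PySem.Str.findFrom source markup pos with hidx
        have hidx0 : (0:Int) ≤ idx := by omega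
        have hge' : pos ≤ idx := by omega
        have hidxcast : ((idx.toNat : Nat) : Int) = idx := Int.toNat_of_nonneg hidx0
        have hlen := hpre.length_le
        rw [List.length_drop] at hlen
        have hub : idx ≤ (source.toList.length : Int) := by
          have hEq := PySem.Chars.findFrom_natCast source.toList markup.toList pos.toNat hk
          rw [hff] at hEq
          have hfl := PySem.Chars.find_le_length (source.toList.drop pos.toNat) markup.toList
          rw [List.length_drop] at hfl
          split at hEq <;> omega
        have hidxle : idx ≤ PySem.Str.len source - PySem.Str.len markup := by omega
        have hskip : scanB source markup pos = scanB source markup idx :=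
          scanB_congr source markup (idx - pos).toNat pos idx hp hge' rfl
            (by
              intro j h1 h2 hmj
              refine hmin j ?_ ?_ hmj
              · omega
              · omega)
        rw [findA_loop, dif_pos hpos, ← hidx, dif_neg hneg]
        by_cases hg1 : 0 < idx ∧ PySem.Str.pyGet? source (idx - 1) = some '`'
        · -- preceded by a backtick: both loops move on to idx + 1
          rw [dif_pos hg1, ih (idx + 1) (by omega) (by omega), hskip]
          have hstep : scanB source markup idx = scanB source markup (idx + 1) := by
            rw [scanB, dif_pos (by omega : idx < PySem.Str.len source - PySem.Str.len markup + 1),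
              if_neg]
            rintro ⟨-, c2, -⟩
            rcases c2 with c2 | c2
            · omega
            · exact c2 hg1.2
          rw [hstep]
        · by_cases hg2 : idx + PySem.Str.len markup < PySem.Str.len source ∧
              PySem.Str.pyGet? source (idx + PySem.Str.len markup) = some '`'
          · -- followed by a backtick: both loops move on to idx + 1
            rw [dif_neg hg1, dif_pos hg2, ih (idx + 1) (by omega) (by omega), hskip]
            have hstep : scanB source markup idx = scanB source markup (idx + 1) := by
              rw [scanB, dif_pos (by omega : idx < PySem.Str.len source - PySem.Str.len markup + 1),
                if_neg]
              rintro ⟨-, -, c3⟩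
              rcases c3 with c3 | c3
              · omega
              · exact c3 hg2.2
            rw [hstep]
          · -- standalone run: both loops return idx
            rw [dif_neg hg1, dif_neg hg2, hskip]
            have hc1 : PySem.Str.slice source (some idx) (some (idx + PySem.Str.len markup)) = markup :=
              (sliceTest_iff source markup idx hidx0).mpr hpre
            have hc2 : idx = 0 ∨ ¬ PySem.Str.pyGet? source (idx - 1) = some '`' := by
              by_cases h0 : idx = 0
              · exact Or.inl h0
              · exact Or.inr (fun hgg => hg1 ⟨by omega, hgg⟩)
            have hc3 : idx + PySem.Str.len markup = PySem.Str.len source ∨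
                ¬ PySem.Str.pyGet? source (idx + PySem.Str.len markup) = some '`' := by
              by_cases hcl : idx + PySem.Str.len markup < PySem.Str.len source
              · exact Or.inr (fun hgg => hg2 ⟨hcl, hgg⟩)
              · exact Or.inl (by omega)
            rw [scanB, dif_pos (by omega : idx < PySem.Str.len source - PySem.Str.len markup + 1),
              if_pos ⟨hc1, hc2, hc3⟩]
    · rw [findA_loop, scanB, dif_neg hpos, dif_neg (by omega)]

-- ===== VERDICT (by name: the statement is the Claim_ definition above) =====
theorem find_backtick_string_py_spec : Claim_equal_find_backtick_string_py := by
  intro source markup start _ hpre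
  unfold Spec_find_backtick_string_py find_backtick_string_py find_backtick_string_py_alt
  exact mainEq source markup _ start le_rfl hpre
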